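-- pv_equiv track=rewrite | github.com/arle1king/todo | n4.py | encontrar_primos
-- ===== SOURCE A (Python) =====
-- def encontrar_primos(mapa: list)->list:
--     """ Buscando primos
--     Parámetros:
--       mapa (list): Matriz que representa cada una de las casillas del mapa del bósque. Cada uno de sus
--                    valores es un número entero entre 1 y 100.
--     Retorno:
--       list: Una lista ordenada con los números que son familiares de Dos y que se encontraron en el bosque. La
--             lista puede tener números repetidos.
--     """
--     lista_fami=[]
--     for i in range(0,len(mapa)):
--         for j in range(0,len(mapa[0])):
--             v=mapa[i][j]
--             rest=True
--             if v==1: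
--                 rest=False
--             for n in range(2,v):
--                 if v%n==0:
--                     rest=False
--             if rest==True:
--                 lista_fami.append(v)
--     lista_fami.sort()
--     return lista_fami
-- ===== SOURCE B (Python) =====
-- def _es_familiar(v):
--     # 1 is the only value of the map's domain (enteros entre 1 y 100) below 2
--     if v == 1:
--         return False
--     d = 2
--     while d * d <= v:
--         if v % d == 0:
--             return False
--         d += 1
--     return True
--
-- def encontrar_primos(mapa: list) -> list:
--     # the map's width is that of its first row
--     ancho = len(mapa[0]) if mapa else 0
--     conteo = {}
--     for fila in mapa:
--         for v in fila[:ancho]: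
--             conteo[v] = conteo.get(v, 0) + 1
--     resultado = []
--     for v in sorted(conteo):
--         if _es_familiar(v):
--             resultado.extend([v] * conteo[v])
--     return resultado
-- ===== Notes on version B (the rewrite author's own statement) =====
-- stated objective: alternative
-- what changed: Instead of trial-dividing every cell by every n in range(2,v) and sorting the kept cells at the end, B tallies the cells of the width-of-first-row grid in a dict once, tests each DISTINCT value a single time by trial division up to sqrt(v), and emits the result already in order by walking the sorted keys and repeating each kept value by its count; Pre_ excludes only the matrices with a row shorter than the first, on which A raises IndexError.
import Mathlib
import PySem

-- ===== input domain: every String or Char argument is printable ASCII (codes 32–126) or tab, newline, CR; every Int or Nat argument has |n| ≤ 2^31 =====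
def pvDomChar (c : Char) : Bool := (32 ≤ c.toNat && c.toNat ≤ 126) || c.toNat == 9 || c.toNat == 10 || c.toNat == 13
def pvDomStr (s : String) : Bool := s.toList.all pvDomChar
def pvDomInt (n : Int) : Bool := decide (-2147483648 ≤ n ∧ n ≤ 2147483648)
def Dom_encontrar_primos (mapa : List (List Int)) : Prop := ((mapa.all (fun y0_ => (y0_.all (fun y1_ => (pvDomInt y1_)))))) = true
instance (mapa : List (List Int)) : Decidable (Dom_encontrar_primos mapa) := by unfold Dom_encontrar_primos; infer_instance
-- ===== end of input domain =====

-- B tallies the grid's cells in a dict counter, tests each DISTINCT value once by trial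
-- division up to √v, and emits the result in sorted-key order; objective: alternative.

-- ===== PORT A =====
-- inner 'rest' computation of A: rest=True; if v==1: rest=False; for n in range(2,v): if v%n==0: rest=False
def restA (v : Int) : Bool :=
  (PySem.List.pyRange 2 v).foldl
    (fun rest n => if PySem.Int.mod v n = 0 then false else rest)
    (if v = 1 then false else true)

def encontrar_primos (mapa : List (List Int)) : List Int :=
  let lista_fami :=
    (PySem.List.pyRange 0 (mapa.length : Int)).foldl (fun acc i =>
      (PySem.List.pyRange 0 ((PySem.List.pyGetD mapa 0 []).length : Int)).foldl (fun acc2 j =>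
        let v := PySem.List.pyGetD (PySem.List.pyGetD mapa i []) j 0
        if restA v = true then acc2 ++ [v] else acc2) acc) []
  PySem.List.sorted lista_fami (fun x => x)

-- ===== PORT B =====
-- _es_familiar of Source B: the while-loop is ported with fuel v.toNat (the loop index d never
-- exceeds v while d*d ≤ v, so the fuel is never exhausted)
def esFamiliarLoop (v : Int) : Nat → Int → Bool
  | 0, _ => true
  | fuel+1, d =>
    if d * d ≤ v then
      (if PySem.Int.mod v d = 0 then false else esFamiliarLoop v fuel (d+1))
    else true

def esFamiliar (v : Int) : Bool :=
  if v = 1 then false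
  else esFamiliarLoop v v.toNat 2

def encontrar_primos_alt (mapa : List (List Int)) : List Int :=
  let ancho : Int := if mapa.isEmpty then 0 else PySem.List.len (PySem.List.pyGetD mapa 0 [])
  let conteo := mapa.foldl (fun d fila =>
      (PySem.List.slice fila none (some ancho)).foldl
        (fun d v => d.insert v (d.getD v 0 + 1)) d) (PySem.Dict.empty : PySem.Dict Int Int)
  (PySem.List.sorted conteo.keys (fun x => x)).foldl
    (fun res v => if esFamiliar v then res ++ List.replicate (conteo.getD v 0).toNat v else res) []

-- ===== PRECONDITION & SPEC =====
-- Pre_ excludes exactly the inputs on which A raises IndexError: a matrix with a row shorter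
-- than its first row (A indexes every row at columns 0..len(mapa[0])-1).
def Pre_encontrar_primos (mapa : List (List Int)) : Prop :=
  ∀ fila ∈ mapa, (mapa.headD []).length ≤ fila.length

instance (mapa : List (List Int)) : Decidable (Pre_encontrar_primos mapa) := by
  unfold Pre_encontrar_primos; infer_instance

def pvWitness_encontrar_primos : List (List Int) := [[2, 3], [4, 5]]

def Spec_encontrar_primos (mapa : List (List Int)) (out : List Int) : Prop := out = encontrar_primos_alt mapa
instance (mapa : List (List Int)) (out : List Int) : Decidable (Spec_encontrar_primos mapa out) := by unfold Spec_encontrar_primos; infer_instance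

-- ===== CLAIM (what is proved, stated in full; the proofs are below) =====
def Claim_equal_encontrar_primos : Prop := ∀ (mapa : List (List Int)), Dom_encontrar_primos mapa → Pre_encontrar_primos mapa → Spec_encontrar_primos mapa (encontrar_primos mapa)

-- ===== LEMMAS AND PROOFS =====

-- A's 'rest' flag is sticky: once false, it stays false
lemma foldl_rest_sticky (v : Int) (l : List Int) (init : Bool) :
    l.foldl (fun r n => if PySem.Int.mod v n = 0 then false else r) init
      = (init && l.all (fun n => decide (PySem.Int.mod v n ≠ 0))) := by
  induction l generalizing init with
  | nil => simp
  | cons n t ih =>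
    simp only [List.foldl_cons, List.all_cons, ih]
    by_cases h : PySem.Int.mod v n = 0 <;> simp [h]

lemma restA_iff (v : Int) :
    restA v = true ↔ (v ≠ 1 ∧ ∀ n : Int, 2 ≤ n → n < v → ¬ (n ∣ v)) := by
  unfold restA
  rw [foldl_rest_sticky]
  simp only [Bool.and_eq_true, List.all_eq_true, PySem.List.mem_pyRange_one,
    decide_eq_true_eq, ← PySem.Int.mod_eq_zero_iff_dvd]
  constructor
  · rintro ⟨h1, h2⟩
    refine ⟨by intro hv; simp [hv] at h1, fun n hn hnv => h2 n ⟨hn, hnv⟩⟩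
  · rintro ⟨h1, h2⟩
    exact ⟨by simp [h1], fun n hn => h2 n hn.1 hn.2⟩

-- characterisation of Source B's while-loop
lemma esFamiliarLoop_iff (v : Int) (hv : 2 ≤ v) :
    ∀ (fuel : Nat) (d : Int), 2 ≤ d → v < d + fuel →
      (esFamiliarLoop v fuel d = true ↔ ∀ e : Int, d ≤ e → e * e ≤ v → ¬ (e ∣ v)) := by
  intro fuel
  induction fuel with
  | zero =>
    intro d hd hfd
    simp only [esFamiliarLoop, true_iff]
    intro e hde hee
    have h1 : e ≤ e * e := le_mul_of_one_le_left (by omega) (by omega)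
    omega
  | succ n ih =>
    intro d hd hfd
    simp only [esFamiliarLoop]
    by_cases hdd : d * d ≤ v
    · simp only [if_pos hdd]
      by_cases hm : PySem.Int.mod v d = 0
      · rw [if_pos hm]
        rw [PySem.Int.mod_eq_zero_iff_dvd] at hm
        simp only [Bool.false_eq_true, false_iff]
        intro h
        exact h d le_rfl hdd hm
      · rw [if_neg hm]
        rw [ih (d + 1) (by omega) (by omega)]
        rw [PySem.Int.mod_eq_zero_iff_dvd] at hm
        constructor
        · intro h e hde hee
          rcases eq_or_lt_of_le hde with he | he
          · exact he ▸ hm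
          · exact h e (by omega) hee
        · intro h e hde hee
          exact h e (by omega) hee
    · simp only [if_neg hdd, true_iff]
      intro e hde hee
      have : d * d ≤ e * e := by nlinarith
      omega

-- only divisors up to √v matter
lemma sqrt_suffices (v : Int) (hv : 2 ≤ v) :
    (∀ e : Int, 2 ≤ e → e * e ≤ v → ¬ (e ∣ v)) ↔
      (∀ n : Int, 2 ≤ n → n < v → ¬ (n ∣ v)) := by
  constructor
  · intro h n h2 hnv hdvd
    obtain ⟨m, hm⟩ := hdvd
    have hm2 : 2 ≤ m := by
      rcases Int.lt_or_le m 2 with hc | hc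
      · have hvn : v ≤ n := by nlinarith
        omega
      · exact hc
    by_cases hnm : n ≤ m
    · exact h n h2 (by nlinarith) ⟨m, hm⟩
    · exact h m hm2 (by nlinarith) ⟨n, by rw [hm]; ring⟩
  · intro h e h2 hee hdvd
    have hev : e < v := by nlinarith
    exact h e h2 hev hdvd

-- the two primality tests agree on every integer (for v ≤ 0 both loops are empty)
lemma esFamiliar_eq_restA (v : Int) : esFamiliar v = restA v := by
  unfold esFamiliar
  by_cases h1 : v = 1
  · rw [if_pos h1]
    have hne : ¬ (restA v = true) := by
      rw [restA_iff]; rintro ⟨hne, -⟩; exact hne h1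
    exact (Bool.eq_false_iff.mpr hne).symm
  · rw [if_neg h1]
    by_cases h0 : v ≤ 0
    · have hfuel : v.toNat = 0 := by omega
      rw [hfuel]
      have h : restA v = true := by
        rw [restA_iff]
        exact ⟨h1, fun n hn hnv => absurd (lt_of_le_of_lt hn hnv) (by omega)⟩
      rw [h]; rfl
    · have hv2 : 2 ≤ v := by omega
      rw [Bool.eq_iff_iff]
      rw [esFamiliarLoop_iff v hv2 v.toNat 2 le_rfl (by omega), sqrt_suffices v hv2, restA_iff]
      exact ⟨fun h => ⟨h1, h⟩, fun h => h.2⟩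

-- nested fold over (a transform of) the rows = fold over the flattened matrix
lemma foldl_foldl_eq_flat {β : Type} (mapa : List (List Int)) (h : List Int → List Int)
    (g : β → Int → β) (d0 : β) :
    mapa.foldl (fun d fila => (h fila).foldl g d) d0 = (mapa.flatMap h).foldl g d0 := by
  induction mapa generalizing d0 with
  | nil => rfl
  | cons fila t ih => simp [List.foldl_append, ih]

-- B's output loop appends one block per key
lemma foldl_append_blocks (l : List Int) (p : Int → Bool) (g : Int → List Int) (acc : List Int) :
    l.foldl (fun res v => if p v then res ++ g v else res) acc
      = acc ++ l.flatMap (fun v => if p v then g v else []) := by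
  rw [PySem.List.foldl_congr_mem l _ (fun res v => res ++ (if p v then g v else []))
    acc (by intro res v _; by_cases h : p v <;> simp [h])]
  exact PySem.List.foldl_append_eq_flatMap _ l acc

-- counting elements of the block list
lemma count_flatMap_blocks (xs : List Int) (p : Int → Bool) (a : Int) :
    ∀ (ks : List Int), ks.Nodup →
      ((ks.flatMap (fun v => if p v then List.replicate (xs.count v) v else [])).count a
        = if a ∈ ks ∧ p a then xs.count a else 0) := by
  intro ks
  induction ks with
  | nil => simp
  | cons k t ih =>
    intro hnd
    rw [List.nodup_cons] at hnd
    simp only [List.flatMap_cons, List.count_append, ih hnd.2]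
    by_cases hka : k = a
    · subst hka
      have hat : k ∉ t := hnd.1
      by_cases hp : p k
      · simp [hp, hat]
      · simp [hp, hat]
    · have : (if p k then List.replicate (xs.count k) k else []).count a = 0 := by
        by_cases hp : p k <;> simp [hp, List.count_replicate, hka]
      rw [this]
      have hak : ¬ a = k := fun h => hka h.symm
      simp [List.mem_cons, hak]

lemma count_filter_eq (xs : List Int) (p : Int → Bool) (a : Int) :
    (xs.filter p).count a = if p a then xs.count a else 0 := by
  by_cases hp : p a
  · simp [hp, List.count_filter]
  · rw [if_neg hp]
    refine List.count_eq_zero.mpr (fun hmem => ?_)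
    exact hp (List.of_mem_filter hmem)

-- the block list is sorted (≤)
lemma pairwise_flatMap_blocks (xs : List Int) (p : Int → Bool) :
    ∀ (ks : List Int), ks.Pairwise (· < ·) →
      (ks.flatMap (fun v => if p v then List.replicate (xs.count v) v else [])).Pairwise
        (fun a b => a ≤ b) := by
  intro ks
  induction ks with
  | nil => simp
  | cons k t ih =>
    intro hpw
    rw [List.pairwise_cons] at hpw
    simp only [List.flatMap_cons]
    rw [List.pairwise_append]
    refine ⟨?_, ih hpw.2, ?_⟩
    · by_cases hp : p k <;> simp [hp, List.pairwise_replicate]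
    · intro a ha b hb
      have hak : a = k := by
        by_cases hp : p k
        · rw [if_pos hp] at ha; exact List.eq_of_mem_replicate ha
        · rw [if_neg hp] at ha; exact absurd ha (List.not_mem_nil)
      obtain ⟨v, hv, hbv⟩ := List.mem_flatMap.mp hb
      have hbv' : b = v := by
        by_cases hp : p v
        · rw [if_pos hp] at hbv; exact List.eq_of_mem_replicate hbv
        · rw [if_neg hp] at hbv; exact absurd hbv (List.not_mem_nil)
      subst hak
      rw [hbv']
      exact le_of_lt (hpw.1 v hv)

-- A's collected list is the filtered flattened matrix, each row cut to the first row's width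
lemma listaA_eq (mapa : List (List Int)) (hPre : Pre_encontrar_primos mapa) :
    (PySem.List.pyRange 0 (mapa.length : Int)).foldl (fun acc i =>
      (PySem.List.pyRange 0 ((PySem.List.pyGetD mapa 0 []).length : Int)).foldl (fun acc2 j =>
        if restA (PySem.List.pyGetD (PySem.List.pyGetD mapa i []) j 0) = true then
          acc2 ++ [PySem.List.pyGetD (PySem.List.pyGetD mapa i []) j 0] else acc2) acc) []
      = (mapa.flatMap (fun fila => fila.take (mapa.headD []).length)).filter restA := by
  rw [PySem.List.foldl_pyRange_zero_pyGetD' mapa []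
    (fun acc fila => (PySem.List.pyRange 0 ((PySem.List.pyGetD mapa 0 []).length : Int)).foldl
      (fun acc2 j => if restA (PySem.List.pyGetD fila j 0) = true then
        acc2 ++ [PySem.List.pyGetD fila j 0] else acc2) acc) []]
  have hhead : PySem.List.pyGetD mapa 0 [] = mapa.headD [] := by
    cases mapa <;> simp [PySem.List.pyGetD, PySem.List.pyIdx?, PySem.List.pyGet?]
  rw [PySem.List.foldl_congr_mem mapa _
    (fun acc fila => acc ++ (fila.take (mapa.headD []).length).filter restA) []
    (by
      intro acc fila hmem
      have hw : (mapa.headD []).length ≤ fila.length := hPre fila hmem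
      have hlen : (fila.take (mapa.headD []).length).length = (mapa.headD []).length := by
        rw [List.length_take, Nat.min_eq_left hw]
      rw [hhead, show ((mapa.headD []).length : Int) = ((fila.take (mapa.headD []).length).length : Int) by rw [hlen]]
      rw [PySem.List.foldl_congr_mem _ _
        (fun acc2 j => if restA (PySem.List.pyGetD (fila.take (mapa.headD []).length) j 0) = true then
          acc2 ++ [PySem.List.pyGetD (fila.take (mapa.headD []).length) j 0] else acc2) acc
        (by
          intro acc2 j hj
          rw [PySem.List.mem_pyRange_one] at hj
          have hgd : PySem.List.pyGetD fila j 0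
              = PySem.List.pyGetD (fila.take (mapa.headD []).length) j 0 := by
            have hj' : j.toNat < (fila.take (mapa.headD []).length).length := by
              rw [hlen]; omega
            rw [PySem.List.pyGetD_of_nonneg fila 0 (by omega : (0:Int) ≤ j),
                PySem.List.pyGetD_of_nonneg (fila.take (mapa.headD []).length) 0
                  (by omega : (0:Int) ≤ j)]
            rw [List.getD_eq_getElem _ _ (by omega : j.toNat < fila.length),
                List.getD_eq_getElem _ _ hj', List.getElem_take]
          rw [hgd])]
      rw [PySem.List.foldl_pyRange_zero_pyGetD' (fila.take (mapa.headD []).length) 0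
        (fun acc2 v => if restA v = true then acc2 ++ [v] else acc2) acc]
      exact PySem.List.foldl_append_if_eq_filter restA (fila.take (mapa.headD []).length) acc)]
  rw [PySem.List.foldl_append_eq_flatMap
    (fun fila => (fila.take (mapa.headD []).length).filter restA) mapa []]
  simp [List.flatMap_def, Function.comp_def]

-- ===== VERDICT (by name: the statement is the Claim_ definition above) =====
theorem encontrar_primos_spec : Claim_equal_encontrar_primos := by
  intro mapa _ hPre
  unfold Spec_encontrar_primos encontrar_primos encontrar_primos_alt
  simp only []
  -- B side: the width and the nested fold that builds the counter
  have hancho : (if mapa.isEmpty then (0:Int) else PySem.List.len (PySem.List.pyGetD mapa 0 []))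
      = ((mapa.headD []).length : Int) := by
    cases mapa <;> simp [PySem.List.pyGetD, PySem.List.pyIdx?, PySem.List.pyGet?]
  rw [hancho]
  have hslice : ∀ fila : List Int,
      PySem.List.slice fila none (some ((mapa.headD []).length : Int))
        = fila.take (mapa.headD []).length := fun fila =>
    PySem.List.slice_to_natCast fila (mapa.headD []).length
  simp only [hslice]
  rw [foldl_foldl_eq_flat mapa (fun fila => fila.take (mapa.headD []).length) _
    (PySem.Dict.empty : PySem.Dict Int Int),
    PySem.Dict.foldl_insert_getD_add_one_eq_counter]
  set xs := mapa.flatMap (fun fila => fila.take (mapa.headD []).length) with hxs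
  rw [PySem.Dict.keys_counter xs]
  rw [foldl_append_blocks, List.nil_append]
  rw [listaA_eq mapa hPre]
  have hrest : restA = esFamiliar := (funext esFamiliar_eq_restA).symm
  rw [hrest]
  -- both sides are ≤-sorted rearrangements of xs.filter esFamiliar
  set ks := PySem.List.sorted (PySem.Set.ofList xs) (fun x => x) with hks
  have hknd : ks.Pairwise (· < ·) := PySem.List.sorted_ofList_pairwise_lt xs
  have hgetD : (fun v => if esFamiliar v then
        List.replicate ((PySem.Dict.counter xs).getD v 0).toNat v else [])
      = (fun v => if esFamiliar v then List.replicate (xs.count v) v else []) := by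
    funext v
    rw [PySem.Dict.getD_counter xs v]
    simp
  rw [hgetD]
  apply PySem.List.eq_of_perm_of_pairwise_le_of_injective (fun x : Int => x)
    (fun a b h => h)
  · -- permutation: both sides have the counts of xs.filter esFamiliar
    refine ((PySem.List.sorted_perm _ _ _).trans (List.perm_iff_count.mpr fun a => ?_))
    rw [count_filter_eq xs esFamiliar a,
      count_flatMap_blocks xs esFamiliar a ks (hknd.nodup)]
    have hmem : a ∈ ks ↔ a ∈ xs := by
      rw [hks, PySem.List.mem_sorted, PySem.Set.mem_ofList]
    by_cases hp : esFamiliar a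
    · by_cases hax : a ∈ xs
      · simp [hp, hmem.mpr hax]
      · simp [hp, hmem, hax, List.count_eq_zero.mpr hax]
    · simp [hp]
  · exact PySem.List.sorted_pairwise _ _
  · exact pairwise_flatMap_blocks xs esFamiliar ks hknd
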